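-- pv_equiv track=rewrite | github.com/grovershreyf9t/USAID-Scrapper | code/utils.py | prune_results
-- ===== SOURCE A (Python) =====
-- def prune_results(results_tree):
--     result_tree_pruned = dict()
--     for m_k,m_v in results_tree.items():
--         result_tree_pruned[m_k] = dict()
--         for o_k,o_v in m_v.items():
--             val_list = [val for val_list in result_tree_pruned[m_k].values() for val in val_list]
--             new_o_v = [v for v in o_v if v not in val_list]
--             result_tree_pruned[m_k][o_k] = new_o_v
--     return result_tree_pruned
-- ===== SOURCE B (Python) =====
-- def prune_results(results_tree):
--     pruned = {}
--     for m_k, m_v in results_tree.items():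
--         first_seen = {}
--         for o_k, o_v in m_v.items():
--             for v in o_v:
--                 if v not in first_seen:
--                     first_seen[v] = o_k
--         pruned[m_k] = {o_k: [v for v in o_v if first_seen[v] == o_k]
--                        for o_k, o_v in m_v.items()}
--     return pruned
-- ===== Notes on version B (the rewrite author's own statement) =====
-- stated objective: faster
-- what changed: A rescans and re-flattens all previously pruned sibling lists for every inner key (quadratic in the total number of values per top-level key); B builds a first_seen value->inner-key index in one pass and then filters each list by a single dict lookup per value.
import Mathlib
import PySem

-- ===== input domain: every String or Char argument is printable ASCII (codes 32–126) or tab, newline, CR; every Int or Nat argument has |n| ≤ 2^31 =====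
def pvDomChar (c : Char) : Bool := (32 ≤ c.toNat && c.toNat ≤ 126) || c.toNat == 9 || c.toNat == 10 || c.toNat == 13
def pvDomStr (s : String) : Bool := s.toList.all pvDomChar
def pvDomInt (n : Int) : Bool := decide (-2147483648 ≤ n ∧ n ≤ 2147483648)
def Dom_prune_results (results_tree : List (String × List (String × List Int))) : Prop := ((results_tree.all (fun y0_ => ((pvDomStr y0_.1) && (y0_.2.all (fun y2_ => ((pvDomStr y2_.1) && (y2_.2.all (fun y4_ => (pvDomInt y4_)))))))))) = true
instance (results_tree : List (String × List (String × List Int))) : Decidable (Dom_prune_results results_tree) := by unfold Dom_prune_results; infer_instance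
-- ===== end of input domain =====

-- B replaces A's per-inner-key rescan of all previously pruned sibling lists by a
-- one-pass first_seen index followed by a per-value lookup filter (objective: faster,
-- by removing the repeated rescan; not measurable at the sizes a timing run runs).

-- ===== PORT A =====
-- inner loop of A over one top-level value: acc is result_tree_pruned[m_k] as an
-- association list (Pre_ guarantees the inner keys o_k are distinct, so Python's
-- dict assignment result_tree_pruned[m_k][o_k] = new_o_v always appends a fresh key).
def pruneInnerA (acc : List (String × List Int)) :
    List (String × List Int) → List (String × List Int)
  | [] => acc
  | (o_k, o_v) :: rest =>
    -- val_list = [val for val_list in result_tree_pruned[m_k].values() for val in val_list]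
    let val_list := acc.flatMap (fun p => p.2)
    -- new_o_v = [v for v in o_v if v not in val_list]
    let new_o_v := o_v.filter (fun v => !(val_list.contains v))
    pruneInnerA (acc ++ [(o_k, new_o_v)]) rest

-- outer loop of A: result_tree_pruned[m_k] = dict(); … (Pre_: top-level keys distinct)
def prune_results (results_tree : List (String × List (String × List Int))) :
    List (String × List (String × List Int)) :=
  results_tree.map (fun p => (p.1, pruneInnerA [] p.2))

-- ===== PORT B =====
-- first pass of B: for o_k, o_v in m_v: for v in o_v: if v not in first_seen: first_seen[v] = o_k
def addVals (o_k : String) (fs : PySem.Dict Int String) (o_v : List Int) : PySem.Dict Int String :=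
  o_v.foldl (fun fs v => if fs.contains v then fs else fs.insert v o_k) fs

def buildFirstSeen (fs : PySem.Dict Int String) :
    List (String × List Int) → PySem.Dict Int String
  | [] => fs
  | (o_k, o_v) :: rest => buildFirstSeen (addVals o_k fs o_v) rest

-- one top-level value of B: {o_k: [v for v in o_v if first_seen[v] == o_k] for o_k, o_v in m_v}
def pruneInnerB (m_v : List (String × List Int)) : List (String × List Int) :=
  let fs := buildFirstSeen PySem.Dict.empty m_v
  m_v.map (fun p => (p.1, p.2.filter (fun v => fs.get? v == some p.1)))

def prune_results_alt (results_tree : List (String × List (String × List Int))) :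
    List (String × List (String × List Int)) :=
  results_tree.map (fun p => (p.1, pruneInnerB p.2))

-- ===== PRECONDITION & SPEC =====
-- The association lists represent Python dicts, whose keys are necessarily distinct;
-- Pre_ excludes lists with duplicate top-level or inner keys, which no Python dict
-- input can produce (on them the assoc-list representation itself is meaningless).
def Pre_prune_results (results_tree : List (String × List (String × List Int))) : Prop :=
  (results_tree.map Prod.fst).Nodup ∧
  ∀ p ∈ results_tree, (p.2.map Prod.fst).Nodup

instance (results_tree : List (String × List (String × List Int))) : Decidable (Pre_prune_results results_tree) := by unfold Pre_prune_results; infer_instance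

def pvWitness_prune_results : (List (String × List (String × List Int))) :=
  [("a", [("x", [1, 2, 2]), ("y", [2, 3])]), ("b", [("x", [1])])]

def Spec_prune_results (results_tree : List (String × List (String × List Int))) (out : List (String × List (String × List Int))) : Prop := out = prune_results_alt results_tree
instance (results_tree : List (String × List (String × List Int))) (out : List (String × List (String × List Int))) : Decidable (Spec_prune_results results_tree out) := by unfold Spec_prune_results; infer_instance

-- ===== CLAIM (what is proved, stated in full; the proofs are below) =====
def Claim_equal_prune_results : Prop := ∀ (results_tree : List (String × List (String × List Int))), Dom_prune_results results_tree → Pre_prune_results results_tree → Spec_prune_results results_tree (prune_results results_tree)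

-- ===== LEMMAS AND PROOFS =====

-- reference function: filter each list against the set of values seen in EARLIER lists
def innerSpec (seen : List Int) : List (String × List Int) → List (String × List Int)
  | [] => []
  | (o_k, o_v) :: rest =>
      (o_k, o_v.filter (fun v => !(seen.contains v))) :: innerSpec (seen ++ o_v) rest

lemma pruneInnerA_eq_innerSpec (l : List (String × List Int))
    (acc : List (String × List Int)) (seen : List Int)
    (h : ∀ x, x ∈ acc.flatMap (fun p => p.2) ↔ x ∈ seen) :
    pruneInnerA acc l = acc ++ innerSpec seen l := by
  induction l generalizing acc seen with
  | nil => simp [pruneInnerA, innerSpec]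
  | cons p rest ih =>
    obtain ⟨o_k, o_v⟩ := p
    simp only [pruneInnerA, innerSpec]
    have hfil : o_v.filter (fun v => !((acc.flatMap (fun p => p.2)).contains v))
        = o_v.filter (fun v => !(seen.contains v)) := by
      apply List.filter_congr
      intro v _
      simp [h v]
    rw [hfil]
    rw [ih (acc ++ [(o_k, o_v.filter (fun v => !(seen.contains v)))]) (seen ++ o_v) ?_]
    · simp
    · intro x
      simp only [List.flatMap_append, List.mem_append, h x]
      simp [List.mem_filter]
      tauto

lemma get?_addVals_of_some (o_k : String) (fs : PySem.Dict Int String)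
    (o_v : List Int) (x : Int) (k : String) (hx : fs.get? x = some k) :
    (addVals o_k fs o_v).get? x = some k := by
  unfold addVals
  induction o_v generalizing fs with
  | nil => simpa
  | cons v vs ih =>
    simp only [List.foldl_cons]
    by_cases hc : fs.contains v
    · rw [if_pos hc]; exact ih fs hx
    · rw [if_neg hc]
      apply ih
      rcases eq_or_ne x v with rfl | hne
      · exact absurd (by rw [PySem.Dict.contains_eq_isSome_get?, hx]; rfl) hc
      · rw [PySem.Dict.get?_insert_of_ne fs o_k hne, hx]

lemma get?_buildFirstSeen_of_some (l : List (String × List Int))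
    (fs : PySem.Dict Int String) (x : Int) (k : String) (hx : fs.get? x = some k) :
    (buildFirstSeen fs l).get? x = some k := by
  induction l generalizing fs with
  | nil => simpa [buildFirstSeen]
  | cons p rest ih =>
    obtain ⟨o_k, o_v⟩ := p
    exact ih _ (get?_addVals_of_some o_k fs o_v x k hx)

lemma get?_addVals_mem (o_k : String) (fs : PySem.Dict Int String)
    (o_v : List Int) (x : Int) (hmem : x ∈ o_v) (hnone : fs.get? x = none) :
    (addVals o_k fs o_v).get? x = some o_k := by
  unfold addVals
  induction o_v generalizing fs with
  | nil => cases hmem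
  | cons v vs ih =>
    simp only [List.foldl_cons]
    by_cases hc : fs.contains v
    · rw [if_pos hc]
      rcases List.mem_cons.mp hmem with rfl | hvs
      · exact absurd hc (by rw [PySem.Dict.contains_eq_isSome_get?, hnone]; simp)
      · exact ih fs hvs hnone
    · rw [if_neg hc]
      rcases eq_or_ne x v with rfl | hne
      · -- after x is present, any further step preserves it
        have : ∀ (fs' : PySem.Dict Int String), fs'.get? x = some o_k →
            (vs.foldl (fun fs v => if fs.contains v then fs else fs.insert v o_k) fs').get? x = some o_k := by
          intro fs' h
          have := get?_addVals_of_some o_k fs' vs x o_k h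
          simpa [addVals] using this
        exact this _ (PySem.Dict.get?_insert_self fs x o_k)
      · rcases List.mem_cons.mp hmem with rfl | hvs
        · exact absurd rfl hne
        · exact ih _ hvs (by rw [PySem.Dict.get?_insert_of_ne fs o_k hne, hnone])

lemma get?_addVals_none (o_k : String) (fs : PySem.Dict Int String)
    (o_v : List Int) (x : Int) (hmem : x ∉ o_v) (hnone : fs.get? x = none) :
    (addVals o_k fs o_v).get? x = none := by
  unfold addVals
  induction o_v generalizing fs with
  | nil => simpa
  | cons v vs ih =>
    simp only [List.foldl_cons]
    have hxv : x ≠ v := fun h => hmem (h ▸ List.mem_cons_self)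
    have hvs : x ∉ vs := fun h => hmem (List.mem_cons_of_mem _ h)
    by_cases hc : fs.contains v
    · rw [if_pos hc]; exact ih fs hvs hnone
    · rw [if_neg hc]
      exact ih _ hvs (by rw [PySem.Dict.get?_insert_of_ne fs o_k hxv, hnone])

-- every value of fs carries an inner key not occurring among the keys of l
def FsKeysFresh (fs : PySem.Dict Int String) (l : List (String × List Int)) : Prop :=
  ∀ x k, fs.get? x = some k → k ∉ l.map Prod.fst

lemma pruneInnerB_core (l : List (String × List Int))
    (fs : PySem.Dict Int String) (seen : List Int)
    (hnodup : (l.map Prod.fst).Nodup)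
    (hfresh : FsKeysFresh fs l)
    (hseen : ∀ x, (fs.get? x).isSome ↔ x ∈ seen) :
    l.map (fun p => (p.1, p.2.filter (fun v => (buildFirstSeen fs l).get? v == some p.1)))
      = innerSpec seen l := by
  induction l generalizing fs seen with
  | nil => rfl
  | cons p rest ih =>
    obtain ⟨o_k, o_v⟩ := p
    simp only [List.map_cons, innerSpec, buildFirstSeen, List.cons.injEq]
    refine ⟨?_, ?_⟩
    · -- head element
      congr 1
      apply List.filter_congr
      intro v hv
      rcases h : fs.get? v with _ | k
      · -- v unseen so far: first_seen keeps v ↦ o_k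
        have h1 : (addVals o_k fs o_v).get? v = some o_k :=
          get?_addVals_mem o_k fs o_v v hv h
        have h2 : (buildFirstSeen (addVals o_k fs o_v) rest).get? v = some o_k :=
          get?_buildFirstSeen_of_some rest _ v o_k h1
        have hns : v ∉ seen := by rw [← hseen v, h]; simp
        simp [h2, hns]
      · -- v seen earlier under key k ≠ o_k
        have h1 : (addVals o_k fs o_v).get? v = some k :=
          get?_addVals_of_some o_k fs o_v v k h
        have h2 : (buildFirstSeen (addVals o_k fs o_v) rest).get? v = some k :=
          get?_buildFirstSeen_of_some rest _ v k h1
        have hk : k ≠ o_k := by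
          intro hkk
          exact hfresh v k h (by simp [hkk])
        have hs : v ∈ seen := by rw [← hseen v, h]; simp
        simp [h2, hk, hs]
    · -- tail
      rw [ih (addVals o_k fs o_v) (seen ++ o_v) (by simpa using hnodup.of_cons) ?_ ?_]
      · intro x k hx hk
        rcases h : fs.get? x with _ | k'
        · by_cases hmem : x ∈ o_v
          · rw [get?_addVals_mem o_k fs o_v x hmem h] at hx
            cases hx
            exact (List.nodup_cons.mp (by simpa using hnodup)).1 hk
          · rw [get?_addVals_none o_k fs o_v x hmem h] at hx
            cases hx
        · rw [get?_addVals_of_some o_k fs o_v x k' h] at hx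
          cases hx
          exact hfresh x k h (List.mem_cons_of_mem _ hk)
      · intro x
        rcases h : fs.get? x with _ | k'
        · by_cases hmem : x ∈ o_v
          · simp [get?_addVals_mem o_k fs o_v x hmem h, hmem]
          · have hns : x ∉ seen := by rw [← hseen x, h]; simp
            simp [get?_addVals_none o_k fs o_v x hmem h, hmem, hns]
        · have hs : x ∈ seen := by rw [← hseen x, h]; simp
          simp [get?_addVals_of_some o_k fs o_v x k' h, hs]

lemma pruneInner_eq (m_v : List (String × List Int))
    (hnodup : (m_v.map Prod.fst).Nodup) :
    pruneInnerA [] m_v = pruneInnerB m_v := by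
  rw [pruneInnerA_eq_innerSpec m_v [] [] (by simp)]
  unfold pruneInnerB
  rw [pruneInnerB_core m_v PySem.Dict.empty [] hnodup
    (fun x k h => by simp [PySem.Dict.get?_empty] at h)
    (fun x => by simp [PySem.Dict.get?_empty])]
  simp

-- ===== VERDICT (by name: the statement is the Claim_ definition above) =====
theorem prune_results_spec : Claim_equal_prune_results := by
  intro results_tree _ hpre
  unfold Spec_prune_results prune_results prune_results_alt
  apply List.map_congr_left
  intro p hp
  rw [pruneInner_eq p.2 (hpre.2 p hp)]
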